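-- pv_equiv track=rewrite | github.com/CE-Walf/Algorithm-problem-solving | 프로그래머스/unrated/181890. 왼쪽 오른쪽/왼쪽 오른쪽.py | solution
-- ===== SOURCE A (Python) =====
-- def solution(str_list):
--     answer = []
--     leftOrRight = "" # 왼쪽 오른쪽 판별
--     stop_index = 0 # 나뉘어지는 분기점
--
--     # stop_index 파악, 왼쪽, 오른쪽 파악
--     for str_element in str_list:
--         if str_element == "l":
--             leftOrRight = "left"
--             break
--         elif str_element == "r":
--             leftOrRight = "right"
--             break
--         stop_index += 1
--
--     # 왼쪽일때와, 오른쪽일때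
--     if leftOrRight == "left":
--         for i in range(stop_index):
--             answer.append(str_list[i])
--     elif leftOrRight == "right":
--         for i in range(stop_index + 1,len(str_list)):
--             answer.append(str_list[i])
--
--     return answer
-- ===== SOURCE B (Python) =====
-- def solution(str_list):
--     n = len(str_list)
--     li = str_list.index("l") if "l" in str_list else n
--     ri = str_list.index("r") if "r" in str_list else n
--     if li < ri:
--         return str_list[:li]
--     if ri < li:
--         return str_list[ri + 1:]
--     return []
-- ===== Notes on version B (the rewrite author's own statement) =====
-- stated objective: simpler
-- what changed: Replaces the breaking scan plus an index-by-index append loop with two independent first-index lookups (l and r), a comparison, and a direct slice.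
import Mathlib
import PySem

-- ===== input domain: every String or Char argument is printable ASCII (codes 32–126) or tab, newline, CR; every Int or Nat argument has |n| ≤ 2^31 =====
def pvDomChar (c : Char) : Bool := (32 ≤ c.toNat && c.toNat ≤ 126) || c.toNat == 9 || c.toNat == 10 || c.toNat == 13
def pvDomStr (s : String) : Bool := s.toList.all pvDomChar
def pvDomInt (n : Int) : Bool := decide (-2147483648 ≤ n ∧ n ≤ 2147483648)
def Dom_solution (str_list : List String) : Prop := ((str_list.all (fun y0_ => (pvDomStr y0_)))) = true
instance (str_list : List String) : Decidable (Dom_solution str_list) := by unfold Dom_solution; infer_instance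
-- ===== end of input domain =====

-- B replaces A's breaking scan + append loop by two first-index lookups, a comparison and a slice (objective: simpler).

-- ===== PORT A =====
-- the first for-loop of A: returns (leftOrRight, stop_index) after the scan
def solutionLoop : List String → String × Int
  | [] => ("", 0)
  | s :: rest =>
      if s = "l" then ("left", 0)
      else if s = "r" then ("right", 0)
      else
        let p := solutionLoop rest
        (p.1, p.2 + 1)

def solution (str_list : List String) : List String :=
  let p := solutionLoop str_list
  if p.1 = "left" then
    -- index i of range(stop_index) is always in range; pyGetD with default "" is exact here
    (PySem.List.pyRange 0 p.2 1).foldl (fun acc i => acc ++ [PySem.List.pyGetD str_list i ""]) []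
  else if p.1 = "right" then
    (PySem.List.pyRange (p.2 + 1) str_list.length 1).foldl
      (fun acc i => acc ++ [PySem.List.pyGetD str_list i ""]) []
  else []

-- ===== PORT B =====
def solution_alt (str_list : List String) : List String :=
  let n : Int := str_list.length
  let li : Int := if "l" ∈ str_list then ((PySem.List.index? str_list "l").getD 0 : Nat) else n
  let ri : Int := if "r" ∈ str_list then ((PySem.List.index? str_list "r").getD 0 : Nat) else n
  if li < ri then PySem.List.slice str_list none (some li)
  else if ri < li then PySem.List.slice str_list (some (ri + 1)) none
  else []

-- ===== PRECONDITION & SPEC =====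
def Spec_solution (str_list : List String) (out : List String) : Prop := out = solution_alt str_list
instance (str_list : List String) (out : List String) : Decidable (Spec_solution str_list out) := by unfold Spec_solution; infer_instance

-- ===== CLAIM (what is proved, stated in full; the proofs are below) =====
def Claim_equal_solution : Prop := ∀ (str_list : List String), Dom_solution str_list → Spec_solution str_list (solution str_list)

-- ===== LEMMAS AND PROOFS =====

-- first index of v, length if absent
def firstIdx (xs : List String) (v : String) : Nat :=
  if v ∈ xs then xs.idxOf v else xs.length

lemma firstIdx_le (xs : List String) (v : String) : firstIdx xs v ≤ xs.length := by
  unfold firstIdx; split_ifs with h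
  · exact le_of_lt (List.idxOf_lt_length_of_mem h)
  · exact le_rfl

lemma firstIdx_lt_iff (xs : List String) (v : String) :
    firstIdx xs v < xs.length ↔ v ∈ xs := by
  unfold firstIdx; split_ifs with h
  · simp [h, List.idxOf_lt_length_of_mem]
  · simp [h]

lemma firstIdx_cons_of_ne (x : String) (xs : List String) (v : String) (h : x ≠ v) :
    firstIdx (x :: xs) v = firstIdx xs v + 1 := by
  unfold firstIdx
  have hm : v ∈ x :: xs ↔ v ∈ xs := by simp [h.symm]
  split_ifs with h1 h2 h2
  · rw [List.idxOf_cons_ne _ (by simpa using h)]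
  · exact absurd (hm.mp h1) h2
  · exact absurd (hm.mpr h2) h1
  · simp

lemma firstIdx_cons_self (x : List String) (v : String) : firstIdx (v :: x) v = 0 := by
  simp [firstIdx]

-- characterisation of A's scan loop
lemma solutionLoop_eq (xs : List String) :
    solutionLoop xs =
      if firstIdx xs "l" < firstIdx xs "r" then ("left", (firstIdx xs "l" : Int))
      else if firstIdx xs "r" < firstIdx xs "l" then ("right", (firstIdx xs "r" : Int))
      else ("", (xs.length : Int)) := by
  induction xs with
  | nil => simp [solutionLoop, firstIdx]
  | cons x t ih =>
    by_cases hl : x = "l"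
    · subst hl
      have h1 : firstIdx ("l" :: t) "l" = 0 := firstIdx_cons_self t "l"
      have h2 : firstIdx ("l" :: t) "r" = firstIdx t "r" + 1 :=
        firstIdx_cons_of_ne _ _ _ (by decide)
      simp [solutionLoop, h1, h2]
    · by_cases hr : x = "r"
      · subst hr
        have h1 : firstIdx ("r" :: t) "r" = 0 := firstIdx_cons_self t "r"
        have h2 : firstIdx ("r" :: t) "l" = firstIdx t "l" + 1 :=
          firstIdx_cons_of_ne _ _ _ (by decide)
        simp [solutionLoop, hl, h1, h2]
      · have h1 : firstIdx (x :: t) "l" = firstIdx t "l" + 1 := firstIdx_cons_of_ne _ _ _ hl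
        have h2 : firstIdx (x :: t) "r" = firstIdx t "r" + 1 := firstIdx_cons_of_ne _ _ _ hr
        simp only [solutionLoop, hl, hr, if_false, ih, h1, h2]
        by_cases c1 : firstIdx t "l" < firstIdx t "r"
        · simp [c1]
        · by_cases c2 : firstIdx t "r" < firstIdx t "l"
          · simp [c1, c2]
          · simp [c1, c2]

-- A's left append loop builds take k
lemma fold_take (xs : List String) (k : Nat) (hk : k ≤ xs.length) :
    (PySem.List.pyRange 0 (k : Int) 1).foldl
      (fun acc i => acc ++ [PySem.List.pyGetD xs i ""]) [] = xs.take k := by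
  induction k with
  | zero => simp
  | succ m ih =>
    have hm : m < xs.length := by omega
    have hsplit : PySem.List.pyRange 0 ((m : Int) + 1) 1 =
        PySem.List.pyRange 0 (m : Int) 1 ++ [(m : Int)] :=
      PySem.List.pyRange_one_succ_right (by positivity)
    have hget : PySem.List.pyGetD xs (m : Int) "" = xs[m] := by
      rw [PySem.List.pyGetD_natCast]; exact List.getD_eq_getElem xs "" hm
    rw [show ((m + 1 : Nat) : Int) = (m : Int) + 1 by push_cast; ring, hsplit,
      List.foldl_append, ih (by omega)]
    simp only [List.foldl_cons, List.foldl_nil, hget, List.take_add_one,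
      List.getElem?_eq_getElem hm, Option.toList_some]

-- A's right append loop builds drop a
lemma fold_drop (xs : List String) (a : Nat) :
    (PySem.List.pyRange (a : Int) xs.length 1).foldl
      (fun acc i => acc ++ [PySem.List.pyGetD xs i ""]) [] = xs.drop a := by
  rw [PySem.List.foldl_pyRange_pyGetD' xs "" (fun acc v => acc ++ [v]) [] (by positivity),
    PySem.List.foldl_append_singleton_eq_self]
  simp

-- B reduces to the same take/drop form
lemma solution_alt_eq (xs : List String) :
    solution_alt xs =
      if firstIdx xs "l" < firstIdx xs "r" then xs.take (firstIdx xs "l")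
      else if firstIdx xs "r" < firstIdx xs "l" then xs.drop (firstIdx xs "r" + 1)
      else [] := by
  have hv : ∀ v : String,
      (if v ∈ xs then (((PySem.List.index? xs v).getD 0 : Nat) : Int) else (xs.length : Int)) =
        (firstIdx xs v : Int) := by
    intro v
    unfold firstIdx
    split_ifs with h
    · rw [PySem.List.index?_eq_idxOf?]
      cases h' : xs.idxOf? v with
      | none => exact absurd (List.idxOf?_eq_none_iff.mp h') (by simpa using h)
      | some k =>
        have : xs.idxOf v = k := by rw [List.idxOf_eq_getD_idxOf?, h']; rfl
        simp [this]
    · rfl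
  unfold solution_alt
  simp only [hv]
  by_cases c1 : firstIdx xs "l" < firstIdx xs "r"
  · rw [if_pos (by exact_mod_cast c1), if_pos c1, PySem.List.slice_to_natCast]
  · rw [if_neg (by exact_mod_cast c1), if_neg c1]
    by_cases c2 : firstIdx xs "r" < firstIdx xs "l"
    · rw [if_pos (by exact_mod_cast c2), if_pos c2,
        show ((firstIdx xs "r" : Int) + 1) = ((firstIdx xs "r" + 1 : Nat) : Int) by push_cast; ring,
        PySem.List.slice_from_natCast]
    · rw [if_neg (by exact_mod_cast c2), if_neg c2]

-- ===== VERDICT (by name: the statement is the Claim_ definition above) =====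
theorem solution_spec : Claim_equal_solution := by
  intro xs _
  show solution xs = solution_alt xs
  rw [solution_alt_eq]
  unfold solution
  rw [solutionLoop_eq xs]
  by_cases c1 : firstIdx xs "l" < firstIdx xs "r"
  · have hmem : "l" ∈ xs := by
      have := firstIdx_le xs "r"
      exact (firstIdx_lt_iff xs "l").mp (by omega)
    simp only [c1, if_pos]
    simpa using fold_take xs (firstIdx xs "l") (firstIdx_le xs "l")
  · by_cases c2 : firstIdx xs "r" < firstIdx xs "l"
    · simp only [c1, c2, if_false, if_pos]
      have : ((firstIdx xs "r" : Int) + 1) = ((firstIdx xs "r" + 1 : Nat) : Int) := by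
        push_cast; ring
      rw [this]
      simpa using fold_drop xs (firstIdx xs "r" + 1)
    · simp [c1, c2]
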